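-- pv_equiv track=rewrite | github.com/coelacant1/ProxmoxScripts | .check/UpdateFunctionIndex.py | remove_old_function_index
-- ===== SOURCE A (Python) =====
-- FUNCTION_INDEX_HEADER = "# Function Index:"
--
-- def remove_old_function_index(comment_block):
--     """
--     Removes any lines from 'Function Index:' through the end of the block.
--     Returns the cleaned list of comment lines.
--     """
--     cleaned_block = []
--     inside_old_index = False
--
--     for line in comment_block:
--         if inside_old_index:
--             # Once we find the start of an old Function Index,
--             # we skip all subsequent lines in this block
--             continue
--
--         if FUNCTION_INDEX_HEADER in line:
--             inside_old_index = True
--             continue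
--
--         cleaned_block.append(line)
--     return cleaned_block
-- ===== SOURCE B (Python) =====
-- FUNCTION_INDEX_HEADER = "# Function Index:"
--
-- def remove_old_function_index(comment_block):
--     """Locate the first header line by scanning the indices back to front,
--     then slice the block before it."""
--     cut = len(comment_block)
--     for i in range(len(comment_block) - 1, -1, -1):
--         if FUNCTION_INDEX_HEADER in comment_block[i]:
--             cut = i
--     return comment_block[:cut]
-- ===== Notes on version B (the rewrite author's own statement) =====
-- stated objective: alternative
-- what changed: Instead of A's single forward pass with an inside_old_index flag and an accumulator list, B scans the indices back to front to locate the earliest header line and then returns a slice of the block before it (staged locate-then-slice, reverse traversal, no accumulator).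
import Mathlib
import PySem

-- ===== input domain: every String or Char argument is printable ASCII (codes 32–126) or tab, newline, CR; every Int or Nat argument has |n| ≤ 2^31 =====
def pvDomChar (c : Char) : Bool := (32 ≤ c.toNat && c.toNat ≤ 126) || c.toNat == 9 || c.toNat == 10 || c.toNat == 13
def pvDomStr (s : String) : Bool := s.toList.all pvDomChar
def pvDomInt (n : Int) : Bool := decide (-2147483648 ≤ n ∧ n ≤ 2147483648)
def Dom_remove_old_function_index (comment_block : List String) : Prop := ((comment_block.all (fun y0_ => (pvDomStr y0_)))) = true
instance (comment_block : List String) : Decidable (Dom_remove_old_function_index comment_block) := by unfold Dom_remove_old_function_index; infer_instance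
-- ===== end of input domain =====

-- B replaces A's one-pass flag-and-accumulator loop by a staged locate-then-slice: a backward
-- index scan finds the earliest header line, then the block is sliced before it; alternative
-- decomposition, same O(n) cost.

def pvHeader : String := "# Function Index:"

-- ===== PORT A =====
-- state = (cleaned_block, inside_old_index); each branch of the loop body in A's order
def remove_old_function_index (comment_block : List String) : List String :=
  (comment_block.foldl
    (fun st line =>
      if st.2 then st
      else if PySem.Str.isIn pvHeader line then (st.1, true)
      else (st.1 ++ [line], st.2))
    ([], false)).1

-- ===== PORT B =====
-- cut = len(comment_block); for i in range(len-1, -1, -1): if header in comment_block[i]: cut = i;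
-- return comment_block[:cut]   (pyGetD is exact here: every i of the range is in bounds)
def remove_old_function_index_alt (comment_block : List String) : List String :=
  PySem.List.slice comment_block none
    (some ((PySem.List.pyRange ((comment_block.length : Int) - 1) (-1) (-1)).foldl
      (fun cut i =>
        if PySem.Str.isIn pvHeader (PySem.List.pyGetD comment_block i "") then i else cut)
      (comment_block.length : Int)))

-- ===== PRECONDITION & SPEC =====
def Spec_remove_old_function_index (comment_block : List String) (out : List String) : Prop := out = remove_old_function_index_alt comment_block
instance (comment_block : List String) (out : List String) : Decidable (Spec_remove_old_function_index comment_block out) := by unfold Spec_remove_old_function_index; infer_instance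

-- ===== CLAIM (what is proved, stated in full; the proofs are below) =====
def Claim_equal_remove_old_function_index : Prop := ∀ (comment_block : List String), Dom_remove_old_function_index comment_block → Spec_remove_old_function_index comment_block (remove_old_function_index comment_block)

-- ===== LEMMAS AND PROOFS =====

-- A-side: once the flag is set, the loop only carries the accumulator through
theorem pv_foldl_flag_true (l : List String) (acc : List String) :
    l.foldl
      (fun st line =>
        if st.2 then st
        else if PySem.Chars.isIn pvHeader.toList line.toList then (st.1, true)
        else (st.1 ++ [line], st.2))
      (acc, true) = (acc, true) := by
  induction l with
  | nil => rfl
  | cons x xs ih => simpa using ih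

-- A-side loop invariant: with the flag off, the result is acc ++ takeWhile
theorem pv_foldl_flag_false (l : List String) (acc : List String) :
    (l.foldl
      (fun st line =>
        if st.2 then st
        else if PySem.Str.isIn pvHeader line then (st.1, true)
        else (st.1 ++ [line], st.2))
      (acc, false)).1 = acc ++ l.takeWhile (fun line => !(PySem.Str.isIn pvHeader line)) := by
  induction l generalizing acc with
  | nil => simp
  | cons x xs ih =>
    by_cases h : PySem.Chars.isIn pvHeader.toList x.toList
    · simp [List.foldl_cons, PySem.Str.isIn, h]
      exact congrArg Prod.fst (pv_foldl_flag_true xs acc)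
    · have hih := ih (acc ++ [x])
      simp [PySem.Str.isIn] at hih
      simp [List.foldl_cons, PySem.Str.isIn, h, hih]

-- B-side: Nat version of the backward-scan result
def pvCut (p : String → Bool) (xs : List String) : Nat :=
  (List.range xs.length).foldr (fun k c => if p (xs.getD k "") then k else c) xs.length

-- shifting the carried index by one commutes with the fold
theorem pv_foldr_shift (q : Nat → Bool) (l : List Nat) (m : Nat) :
    l.foldr (fun k c => if q k then (k + 1) else c) (m + 1)
      = (l.foldr (fun k c => if q k then k else c) m) + 1 := by
  induction l with
  | nil => rfl
  | cons x xs ih => by_cases h : q x <;> simp [h, ih]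

theorem pvCut_eq_findIdx (p : String → Bool) (xs : List String) :
    pvCut p xs = xs.findIdx p := by
  induction xs with
  | nil => rfl
  | cons x t ih =>
    unfold pvCut at *
    rw [List.length_cons, List.range_succ_eq_map, List.foldr_cons, List.foldr_map]
    simp only [Nat.succ_eq_add_one, List.getD_cons_zero, List.getD_cons_succ]
    by_cases h : p x
    · rw [if_pos h, List.findIdx_cons, Bool.cond_eq_ite, if_pos h]
    · rw [if_neg h, pv_foldr_shift (fun k => p (t.getD k "")) (List.range t.length) t.length,
        ih, List.findIdx_cons, Bool.cond_eq_ite, if_neg h]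

-- the Int fold over the countdown range is the cast of the Nat backward scan
theorem pv_intFold_eq_cut (p : String → Bool) (xs : List String) :
    (PySem.List.pyRange ((xs.length : Int) - 1) (-1) (-1)).foldl
      (fun cut i => if p (PySem.List.pyGetD xs i "") then i else cut) (xs.length : Int)
      = (pvCut p xs : Int) := by
  have hrev : PySem.List.pyRange ((xs.length : Int) - 1) (-1) (-1)
      = (PySem.List.pyRange 0 (xs.length : Int) 1).reverse := by
    have h := PySem.List.pyRange_neg_one_eq_reverse ((xs.length : Int) - 1) (-1)
    simpa using h
  rw [hrev, List.foldl_reverse, PySem.List.pyRange_one, List.foldr_map]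
  simp only [zero_add, Int.sub_zero, Int.toNat_natCast]
  have key : ∀ (l : List Nat) (m : Nat),
      l.foldr (fun (k : Nat) (c : Int) => if p (PySem.List.pyGetD xs ((k : Int)) "") then ((k : Int)) else c)
          (m : Int)
        = ((l.foldr (fun k c => if p (xs.getD k "") then k else c) m : Nat) : Int) := by
    intro l m
    induction l with
    | nil => rfl
    | cons a t ih =>
      rw [List.foldr_cons, List.foldr_cons, ih, PySem.List.pyGetD_natCast]
      by_cases h : p (xs.getD a "")
      · rw [if_pos h, if_pos h]
      · rw [if_neg h, if_neg h]
  unfold pvCut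
  exact key (List.range xs.length) xs.length

-- slicing before the first index where p holds is takeWhile (!p)
theorem pv_take_findIdx (p : String → Bool) (xs : List String) :
    xs.take (xs.findIdx p) = xs.takeWhile (fun s => !(p s)) := by
  induction xs with
  | nil => rfl
  | cons x t ih =>
    by_cases h : p x
    · simp [List.findIdx_cons, h]
    · simp [List.findIdx_cons, h, ih]

theorem pv_alt_eq_takeWhile (xs : List String) :
    remove_old_function_index_alt xs
      = xs.takeWhile (fun line => !(PySem.Str.isIn pvHeader line)) := by
  unfold remove_old_function_index_alt
  rw [pv_intFold_eq_cut (fun line => PySem.Str.isIn pvHeader line) xs,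
    PySem.List.slice_to_natCast, pvCut_eq_findIdx, pv_take_findIdx]

-- ===== VERDICT (by name: the statement is the Claim_ definition above) =====
theorem remove_old_function_index_spec : Claim_equal_remove_old_function_index := by
  intro comment_block _
  unfold Spec_remove_old_function_index remove_old_function_index
  rw [pv_alt_eq_takeWhile]
  simpa using pv_foldl_flag_false comment_block []
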